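-- pv_equiv track=rewrite | github.com/Koojunhui/code-test | kakao/2023kakao/Lv3표현가능한이진트리/해설.py | solution
-- ===== SOURCE A (Python) =====
-- def solution(numbers):
--     def next_full_len(x_len: int) -> int:
--         # 길이가 2^h - 1 이상이 되도록 최소 h를 찾아 반환
--         size = 1
--         while size < x_len:
--             size = size * 2 + 1
--         return size
--
--     def can_represent(bin_str: str) -> bool:
--         # bin_str는 길이가 2^h - 1인, 중위 순회 배열 관점의 서브트리 구간
--         # 규칙: 부모가 0이면 이 구간 전체에 1이 있으면 안 됨
--         if len(bin_str) == 1: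
--             return True
--         mid = len(bin_str) // 2
--         root = bin_str[mid]
--         if root == '0':
--             # 부모가 더미면 이 서브트리 어디에도 1이 나오면 안 됨
--             return bin_str.count('1') == 0
--         # 부모가 1이면 좌/우 서브트리 각각 재귀 확인
--         left = bin_str[:mid]
--         right = bin_str[mid+1:]
--         return can_represent(left) and can_represent(right)
--
--     ans = []
--     for n in numbers:
--         b = bin(n)[2:]                 # 이진수 문자열
--         full_len = next_full_len(len(b))
--         b = b.zfill(full_len)          # 앞쪽 0으로 포화 트리 길이 맞추기
--         ans.append(1 if can_represent(b) else 0)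
--     return ans
-- ===== SOURCE B (Python) =====
-- def solution(numbers):
--     # Flat scan instead of divide-and-conquer: pad to full-tree length, then for
--     # each '1' bit walk the root-to-node descent path (a binary search over the
--     # inorder index range) and require every ancestor on the path to be non-'0'.
--     ans = []
--     for n in numbers:
--         s = bin(n)[2:]
--         size = 1
--         while size < len(s):
--             size = size * 2 + 1
--         s = s.rjust(size, '0')
--         ok = True
--         for i in range(1, size + 1):          # 1-based inorder index
--             if s[i - 1] != '1':
--                 continue
--             lo, hi = 1, size
--             while ok:                          # descend from the root to i
--                 mid = (lo + hi) // 2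
--                 if mid == i:
--                     break
--                 if s[mid - 1] == '0':
--                     ok = False
--                 elif i < mid:
--                     hi = mid - 1
--                 else:
--                     lo = mid + 1
--             if not ok:
--                 break
--         ans.append(1 if ok else 0)
--     return ans
-- ===== Notes on version B (the rewrite author's own statement) =====
-- stated objective: alternative
-- what changed: Replaces can_represent's divide-and-conquer recursion over string slices by a single flat scan of the 1-based inorder indices that, for each '1' bit, walks the root-to-node binary-search descent path and requires every ancestor on it to be non-'0'.
import Mathlib
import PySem

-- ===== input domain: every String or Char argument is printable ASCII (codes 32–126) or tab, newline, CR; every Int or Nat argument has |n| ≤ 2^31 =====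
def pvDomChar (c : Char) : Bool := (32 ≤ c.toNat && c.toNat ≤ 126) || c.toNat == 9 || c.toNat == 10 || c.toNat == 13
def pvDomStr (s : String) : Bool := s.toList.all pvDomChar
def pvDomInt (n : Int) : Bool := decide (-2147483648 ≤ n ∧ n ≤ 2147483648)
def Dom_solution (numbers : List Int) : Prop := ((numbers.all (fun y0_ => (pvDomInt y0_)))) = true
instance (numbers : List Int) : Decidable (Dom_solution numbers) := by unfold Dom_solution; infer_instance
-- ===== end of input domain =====

-- B replaces A's divide-and-conquer recursion over string slices by a single flat scan of the
-- 1-based inorder indices: every '1' bit must have no '0' on its root-to-node descent path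
-- (objective: alternative decomposition, same exact values).

-- ===== PORT A =====

-- `next_full_len`: `size = 1; while size < x_len: size = size*2+1; return size`
-- (the loop counter is kept as a Nat internally — it only ever holds 1, 3, 7, … — and the
-- structural fuel `xLen.toNat` only totalizes the loop: it runs ≤ log₂ xLen ≤ xLen.toNat times)
def nextFullLenLoop (xLen : Int) : Nat → Nat → Nat
  | 0, size => size
  | fuel + 1, size => if (size : Int) < xLen then nextFullLenLoop xLen fuel (size * 2 + 1) else size

def nextFullLen (xLen : Int) : Int := (nextFullLenLoop xLen xLen.toNat 1 : Nat)

-- `can_represent` on the characters of the string; `bin_str[mid]` via pyGetD (always in range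
-- here). Python tests `len == 1`; the `≤ 1` guard and the structural fuel `s.length` only
-- totalize it: both slices are strictly shorter than s, and the empty string (where the fuel
-- or the guard would fire) never occurs — bin(n)[2:] is nonempty, Python would raise at s[mid].
def canRepGo : Nat → List Char → Bool
  | 0, _ => true
  | fuel + 1, s =>
    if s.length ≤ 1 then true
    else if PySem.List.pyGetD s (PySem.Int.floordiv (PySem.List.len s) 2) ' ' = '0' then
      PySem.Chars.count s ['1'] == 0
    else
      canRepGo fuel (PySem.List.slice s none (some (PySem.Int.floordiv (PySem.List.len s) 2))) &&
      canRepGo fuel (PySem.List.slice s (some (PySem.Int.floordiv (PySem.List.len s) 2 + 1)) none)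

def canRep (s : List Char) : Bool := canRepGo s.length s

def solution (numbers : List Int) : List Int :=
  numbers.foldl (fun ans n =>
    ans ++ [if canRep (PySem.Chars.zfill
                (PySem.List.slice (PySem.Int.toBinChars0b n) (some 2) none)
                (nextFullLen (PySem.List.len
                  (PySem.List.slice (PySem.Int.toBinChars0b n) (some 2) none)))) then 1 else 0]) []

-- ===== PORT B =====

-- the same inline `size = 1; while size < len(s): size = size*2+1` loop of Source B
-- (structural fuel `lenS.toNat` only totalizes it, as in nextFullLenLoop)
def fullSizeLoop (lenS : Int) : Nat → Nat → Nat
  | 0, size => size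
  | fuel + 1, size => if (size : Int) < lenS then fullSizeLoop lenS fuel (size * 2 + 1) else size

-- the `while ok:` descent loop of Source B; the fuel only totalizes it (the range halves each
-- step, so fuel `size + 1` is never exhausted on the calls solution_alt makes)
def descend (s : List Char) (i lo hi : Int) : Nat → Bool
  | 0 => true
  | fuel + 1 =>
    if PySem.Int.floordiv (lo + hi) 2 = i then true
    else if PySem.List.pyGetD s (PySem.Int.floordiv (lo + hi) 2 - 1) ' ' = '0' then false
    else if i < PySem.Int.floordiv (lo + hi) 2 then
      descend s i lo (PySem.Int.floordiv (lo + hi) 2 - 1) fuel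
    else
      descend s i (PySem.Int.floordiv (lo + hi) 2 + 1) hi fuel


-- one number: s = bin(n)[2:], pad (s.rjust(size,·0·) = left-pad, exact incl. width ≤ len), scan
def checkOne (n : Int) : Int :=
  let s0 := PySem.List.slice (PySem.Int.toBinChars0b n) (some 2) none
  let size : Nat := fullSizeLoop (PySem.List.len s0) (PySem.List.len s0).toNat 1
  let s := List.replicate (size - s0.length) '0' ++ s0
  if (PySem.List.pyRange 1 ((size : Int) + 1) 1).all (fun i =>
      if PySem.List.pyGetD s (i - 1) ' ' ≠ '1' then true
      else descend s i 1 (size : Int) (size + 1)) then 1 else 0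

def solution_alt (numbers : List Int) : List Int :=
  numbers.foldl (fun ans n => ans ++ [checkOne n]) []

-- ===== PRECONDITION & SPEC =====
def Spec_solution (numbers : List Int) (out : List Int) : Prop := out = solution_alt numbers
instance (numbers : List Int) (out : List Int) : Decidable (Spec_solution numbers out) := by unfold Spec_solution; infer_instance

-- ===== CLAIM (what is proved, stated in full; the proofs are below) =====
def Claim_equal_solution : Prop := ∀ (numbers : List Int), Dom_solution numbers → Spec_solution numbers (solution numbers)

-- ===== LEMMAS AND PROOFS =====

theorem digitChar_no_sign (m : Nat) : Nat.digitChar m ≠ '+' ∧ Nat.digitChar m ≠ '-' := by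
  rcases Nat.lt_or_ge m 16 with h | h
  · interval_cases m <;> decide
  · have h' : Nat.digitChar m = '*' := by
      unfold Nat.digitChar
      repeat rw [if_neg (by omega)]
    rw [h']; decide

theorem toDigitsCore_no_sign (b : Nat) : ∀ (fuel n : Nat) (acc : List Char),
    (∀ c ∈ acc, c ≠ '+' ∧ c ≠ '-') →
    ∀ c ∈ Nat.toDigitsCore b fuel n acc, c ≠ '+' ∧ c ≠ '-' := by
  intro fuel
  induction fuel with
  | zero => intro n acc hacc c hc; rw [Nat.toDigitsCore] at hc; exact hacc c hc
  | succ f ih =>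
    intro n acc hacc c hc
    rw [Nat.toDigitsCore] at hc
    split at hc
    · rcases List.mem_cons.mp hc with h | h
      · subst h; exact digitChar_no_sign _
      · exact hacc c h
    · refine ih _ _ ?_ c hc
      intro c' hc'
      rcases List.mem_cons.mp hc' with h | h
      · subst h; exact digitChar_no_sign _
      · exact hacc c' h

theorem binTail_no_sign (n : Int) (c : Char)
    (h : (PySem.List.slice (PySem.Int.toBinChars0b n) (some 2) none).head? = some c) :
    c ≠ '+' ∧ c ≠ '-' := by
  rw [PySem.List.slice_from (PySem.Int.toBinChars0b n) (show (0:Int) ≤ 2 by norm_num)] at h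
  unfold PySem.Int.toBinChars0b at h
  rw [show ((2:Int).toNat) = 2 by decide] at h
  split at h
  · simp only [List.drop_succ_cons, List.drop_zero, List.head?_cons] at h
    cases h; decide
  · simp only [List.drop_succ_cons, List.drop_zero] at h
    unfold Nat.toDigits at h
    exact toDigitsCore_no_sign 2 _ _ [] (by simp) c (List.mem_of_mem_head? h)

theorem count_go_single (c : Char) : ∀ (s : List Char) (fuel acc : Nat),
    s.length ≤ fuel → PySem.Chars.count.go [c] fuel s acc = acc + s.count c := by
  intro s
  induction s with
  | nil => intro fuel acc h; cases fuel <;> simp [PySem.Chars.count.go]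
  | cons x t ih =>
    intro fuel acc h
    match fuel with
    | f + 1 =>
      rw [PySem.Chars.count.go]
      simp only [List.isPrefixOf, List.length_cons, List.length_nil, List.drop_succ_cons,
        List.drop_zero, Bool.and_true] at *
      by_cases hx : c = x
      · rw [if_pos (by simp [hx])]
        rw [ih f (acc + 1) (by omega)]
        simp [hx]
        omega
      · rw [if_neg (by simp [hx])]
        rw [ih f acc (by omega)]
        simp [Ne.symm hx]

theorem count_single (s : List Char) (c : Char) :
    PySem.Chars.count s [c] = s.count c := by
  unfold PySem.Chars.count
  rw [if_neg (by simp)]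
  simpa using count_go_single c s s.length 0 le_rfl

theorem sizeLoop_spec (L : Int) : ∀ (fuel s : Nat), 1 ≤ s → (∃ k : Nat, s = 2 ^ k - 1) →
    L ≤ ((s : Int) + 1) * 2 ^ fuel - 1 →
    ∃ k : Nat, fullSizeLoop L fuel s = 2 ^ k - 1 ∧ L ≤ (fullSizeLoop L fuel s : Int) ∧
      s ≤ fullSizeLoop L fuel s := by
  intro fuel
  induction fuel with
  | zero =>
    intro s h1 h2 h3
    exact ⟨h2.choose, h2.choose_spec, by rw [fullSizeLoop]; push_cast at h3 ⊢; omega, le_refl _⟩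
  | succ f ih =>
    intro s h1 h2 h3
    rw [fullSizeLoop]
    split
    · next hlt =>
      obtain ⟨k, hk⟩ := h2
      obtain ⟨k', h1', h2', h3'⟩ := ih (s * 2 + 1) (by omega)
        ⟨k + 1, by subst hk; have := Nat.one_le_two_pow (n := k); ring_nf; omega⟩
        (by push_cast at h3 ⊢; rw [pow_succ] at h3; nlinarith)
      exact ⟨k', h1', h2', by omega⟩
    · next hge => exact ⟨h2.choose, h2.choose_spec, by omega, le_refl _⟩

theorem zfill_no_sign (cs : List Char) (w : Int)
    (h : ∀ c, cs.head? = some c → c ≠ '+' ∧ c ≠ '-') :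
    PySem.Chars.zfill cs w = List.replicate (w.toNat - cs.length) '0' ++ cs := by
  unfold PySem.Chars.zfill
  split
  · next hle => rw [show w.toNat - cs.length = 0 by omega]; simp
  · next hgt =>
    match cs with
    | [] => simp
    | c :: rest =>
      have := h c rfl
      simp only []
      rw [if_neg (by tauto)]

theorem mid_bounds (lo hi : Int) (h : lo ≤ hi) :
    lo ≤ PySem.Int.floordiv (lo + hi) 2 ∧ PySem.Int.floordiv (lo + hi) 2 ≤ hi :=
  PySem.Int.floordiv_two_mid_bounds h

theorem descend_fuel (s : List Char) : ∀ (n : Nat) (lo hi i : Int) (f g : Nat),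
    lo ≤ i → i ≤ hi → (hi - lo).toNat ≤ n → n < f → n < g →
    descend s i lo hi f = descend s i lo hi g := by
  intro n
  induction n using Nat.strong_induction_on with
  | _ n ih =>
    intro lo hi i f g h1 h2 h3 hf hg
    match f, g with
    | f + 1, g + 1 =>
      obtain ⟨hm1, hm2⟩ := mid_bounds lo hi (le_trans h1 h2)
      rw [descend, descend]
      set mid := PySem.Int.floordiv (lo + hi) 2 with hmid
      by_cases he : mid = i
      · rw [if_pos he, if_pos he]
      · rw [if_neg he, if_neg he]
        by_cases hz : PySem.List.pyGetD s (mid - 1) ' ' = '0'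
        · rw [if_pos hz, if_pos hz]
        · rw [if_neg hz, if_neg hz]
          by_cases hlt : i < mid
          · rw [if_pos hlt, if_pos hlt]
            exact ih (mid - 1 - lo).toNat (by omega) lo (mid - 1) i f g h1 (by omega)
              le_rfl (by omega) (by omega)
          · rw [if_neg hlt, if_neg hlt]
            exact ih (hi - (mid + 1)).toNat (by omega) (mid + 1) hi i f g (by omega) h2
              le_rfl (by omega) (by omega)

theorem sliceL_eq (s : List Char) :
    PySem.List.slice s none (some (PySem.Int.floordiv (PySem.List.len s) 2)) = s.take (s.length / 2) := by
  simp only [PySem.List.len_eq]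
  rw [show PySem.Int.floordiv (s.length : Int) 2 = ((s.length / 2 : Nat) : Int) from by
    exact_mod_cast PySem.Int.floordiv_natCast s.length 2, PySem.List.slice_to_natCast]

theorem sliceR_eq (s : List Char) :
    PySem.List.slice s (some (PySem.Int.floordiv (PySem.List.len s) 2 + 1)) none = s.drop (s.length / 2 + 1) := by
  simp only [PySem.List.len_eq]
  have hf : PySem.Int.floordiv (s.length : Int) 2 = ((s.length / 2 : Nat) : Int) := by
    exact_mod_cast PySem.Int.floordiv_natCast s.length 2
  rw [show PySem.Int.floordiv (s.length : Int) 2 + 1 = ((s.length / 2 + 1 : Nat) : Int) by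
    rw [hf]; push_cast; ring, PySem.List.slice_from_natCast]

theorem canRepGo_congr : ∀ (n : Nat) (s : List Char) (f g : Nat),
    s.length ≤ n → s.length ≤ f → s.length ≤ g → canRepGo f s = canRepGo g s := by
  intro n
  induction n using Nat.strong_induction_on with
  | _ n ih =>
    intro s f g hn hf hg
    by_cases h1 : s.length ≤ 1
    · have t : ∀ m, canRepGo m s = true := by
        intro m
        cases m with
        | zero => rfl
        | succ m => rw [canRepGo, if_pos h1]
      rw [t f, t g]
    · obtain ⟨f', rfl⟩ : ∃ f', f = f' + 1 := ⟨f - 1, by omega⟩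
      obtain ⟨g', rfl⟩ : ∃ g', g = g' + 1 := ⟨g - 1, by omega⟩
      rw [canRepGo, canRepGo]
      simp only [if_neg h1]
      split
      · rfl
      · rw [sliceL_eq, sliceR_eq]
        rw [ih (n - 1) (by omega) (s.take (s.length / 2)) f' g' (by simp only [List.length_take]; omega)
          (by simp only [List.length_take]; omega) (by simp only [List.length_take]; omega)]
        rw [ih (n - 1) (by omega) (s.drop (s.length / 2 + 1)) f' g' (by simp only [List.length_drop]; omega)
          (by simp only [List.length_drop]; omega) (by simp only [List.length_drop]; omega)]

theorem canRep_trivial (s : List Char) (h : s.length ≤ 1) : canRep s = true := by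
  unfold canRep
  by_cases h0 : s.length = 0
  · rw [h0]; rfl
  · obtain ⟨t, ht⟩ : ∃ t, s.length = t + 1 := ⟨s.length - 1, by omega⟩
    conv_lhs => rw [ht]
    rw [canRepGo, if_pos h]

theorem canRep_unfold (s : List Char) (h : 2 ≤ s.length) :
    canRep s = (if PySem.List.pyGetD s (PySem.Int.floordiv (PySem.List.len s) 2) ' ' = '0' then
      ((PySem.Chars.count s ['1'] == 0 : Bool))
    else
      canRep (PySem.List.slice s none (some (PySem.Int.floordiv (PySem.List.len s) 2))) &&
      canRep (PySem.List.slice s (some (PySem.Int.floordiv (PySem.List.len s) 2 + 1)) none)) := by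
  obtain ⟨t, ht⟩ : ∃ t, s.length = t + 1 := ⟨s.length - 1, by omega⟩
  conv_lhs => rw [canRep, ht]
  rw [canRepGo, if_neg (by omega)]
  split
  · rfl
  · rw [sliceL_eq, sliceR_eq]
    unfold canRep
    rw [canRepGo_congr s.length (s.take (s.length / 2)) t (s.take (s.length / 2)).length
      (by simp only [List.length_take]; omega) (by simp only [List.length_take]; omega) (le_refl _),
      canRepGo_congr s.length (s.drop (s.length / 2 + 1)) t (s.drop (s.length / 2 + 1)).length
      (by simp only [List.length_drop]; omega) (by simp only [List.length_drop]; omega) (le_refl _)]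

theorem getD_seg (s : List Char) (a n k : Nat) (hk : k < n) :
    ((s.drop a).take n).getD k ' ' = s.getD (a + k) ' ' := by
  rw [List.getD_eq_getElem?_getD, List.getD_eq_getElem?_getD, List.getElem?_take_of_lt hk,
    List.getElem?_drop]

theorem mem_seg (s : List Char) (a n : Nat) (hb : a + n ≤ s.length) :
    ('1' ∈ (s.drop a).take n) ↔ ∃ k, k < n ∧ s.getD (a + k) ' ' = '1' := by
  have hlen : ((s.drop a).take n).length = n := by simp; omega
  constructor
  · intro hm
    obtain ⟨k, hk, he⟩ := List.mem_iff_getElem.mp hm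
    refine ⟨k, by omega, ?_⟩
    rw [← getD_seg s a n k (by omega), List.getD_eq_getElem?_getD, List.getElem?_eq_getElem hk, he]
    rfl
  · rintro ⟨k, hk, he⟩
    rw [← getD_seg s a n k hk] at he
    have hk' : k < ((s.drop a).take n).length := by omega
    rw [List.getD_eq_getElem?_getD, List.getElem?_eq_getElem hk'] at he
    exact he ▸ List.getElem_mem hk'

theorem pyGetD_idx (s : List Char) (i : Int) (h1 : 1 ≤ i) (h2 : i ≤ s.length) :
    PySem.List.pyGetD s (i - 1) ' ' = s.getD (i - 1).toNat ' ' := by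
  rw [PySem.List.pyGetD_eq_getElem s ' ' (by omega) (by omega)]
  rw [List.getD_eq_getElem?_getD, List.getElem?_eq_getElem (by omega)]
  rfl

theorem midcast (a b : Nat) : PySem.Int.floordiv ((a : Int) + (b : Int)) 2 = (((a + b) / 2 : Nat) : Int) := by
  rw [show ((a:Int) + (b:Int)) = ((a + b : Nat) : Int) by push_cast; ring]
  exact_mod_cast PySem.Int.floordiv_natCast (a+b) 2

theorem canRep_main (h : Nat) : ∀ (s : List Char) (lo : Nat), 1 ≤ lo →
    lo - 1 + (2 ^ h - 1) ≤ s.length →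
    (canRep ((s.drop (lo - 1)).take (2 ^ h - 1)) = true ↔
      ∀ i : Int, (lo : Int) ≤ i → i ≤ (lo : Int) + (2 ^ h : Int) - 2 →
        PySem.List.pyGetD s (i - 1) ' ' = '1' →
        descend s i (lo : Int) ((lo : Int) + (2 ^ h : Int) - 2) (2 ^ h - 1) = true) := by
  induction h with
  | zero =>
    intro s lo hlo hb
    constructor
    · intro _ i hi1 hi2 _
      exfalso; norm_num at hi2; omega
    · intro _
      rw [show (2 ^ 0 - 1 : Nat) = 0 from rfl, List.take_zero]
      exact canRep_trivial _ (by simp)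
  | succ h IH =>
    intro s lo hlo hb
    rcases Nat.eq_zero_or_pos h with h0 | hpos
    · -- height-1 tree: a single character, both sides are `true`
      subst h0
      norm_num at hb ⊢
      have hlen : ((s.drop (lo - 1)).take 1).length = 1 := by simp; omega
      have hmid : PySem.Int.floordiv ((lo : Int) + (lo : Int)) 2 = (lo : Int) := by
        rw [midcast]; congr 1; omega
      constructor
      · intro _ i hi1 hi2 _
        have hieq : i = (lo : Int) := by omega
        subst hieq
        rw [descend, hmid, if_pos rfl]
      · intro _
        exact canRep_trivial _ (by omega)
    · -- general case: 2^(h+1)-1 = 2m+1 with m = 2^h-1 ≥ 1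
      have hp : 1 ≤ 2 ^ h := Nat.one_le_two_pow
      set m : Nat := 2 ^ h - 1 with hm
      have hm1 : 1 ≤ m := by
        have : 2 ≤ 2 ^ h := by calc 2 = 2^1 := rfl
                                    _ ≤ 2^h := Nat.pow_le_pow_right (by norm_num) hpos
        omega
      have hpow1 : 2 ^ (h + 1) - 1 = 2 * m + 1 := by rw [pow_succ]; omega
      have hpowI : ((2 : Int) ^ (h + 1)) = ((2 * m + 2 : Nat) : Int) := by
        have : (2 : Int) ^ (h+1) = ((2 ^ (h+1) : Nat) : Int) := by push_cast; ring
        rw [this]; congr 1; rw [pow_succ]; omega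
      have hpowh : ((2 : Int) ^ h) = ((m + 1 : Nat) : Int) := by
        have : (2 : Int) ^ h = ((2 ^ h : Nat) : Int) := by push_cast; ring
        rw [this]; congr 1; omega
      rw [hpow1, hpowI]
      have hhi : (lo : Int) + ((2 * m + 2 : Nat) : Int) - 2 = ((lo + 2 * m : Nat) : Int) := by
        push_cast; ring
      rw [hhi]
      have hb' : lo - 1 + (2 * m + 1) ≤ s.length := by rw [hpow1] at hb; exact hb
      -- abbreviations
      set t : List Char := (s.drop (lo - 1)).take (2 * m + 1) with ht
      have hlen : t.length = 2 * m + 1 := by rw [ht]; simp; omega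
      -- the root position
      have hmid : PySem.Int.floordiv ((lo : Int) + ((lo + 2 * m : Nat) : Int)) 2
          = ((lo + m : Nat) : Int) := by
        rw [show ((lo:Int) + ((lo + 2*m : Nat):Int)) = ((lo + (lo + 2*m) : Nat):Int) by push_cast; ring]
        rw [show PySem.Int.floordiv (((lo + (lo + 2*m) : Nat)):Int) 2 = (((lo + (lo + 2*m)) / 2 : Nat) : Int) from by
          exact_mod_cast PySem.Int.floordiv_natCast _ 2]
        congr 1; omega
      -- unfold canRep once
      rw [canRep_unfold t (by omega)]
      simp only [PySem.List.len_eq, hlen]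
      rw [show PySem.Int.floordiv (((2*m+1 : Nat)):Int) 2 = ((m : Nat) : Int) from by
        rw [show PySem.Int.floordiv (((2*m+1 : Nat)):Int) 2 = (((2*m+1) / 2 : Nat) : Int) from by
          exact_mod_cast PySem.Int.floordiv_natCast _ 2]
        congr 1; omega]
      rw [PySem.List.pyGetD_natCast]
      rw [show t.getD m ' ' = s.getD (lo - 1 + m) ' ' from by
        rw [ht]; exact getD_seg s (lo-1) (2*m+1) m (by omega)]
      -- the slices are the two half-windows
      rw [PySem.List.slice_to_natCast,
        show t.take m = (s.drop (lo - 1)).take m from by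
          rw [ht, List.take_take]; congr 1; omega]
      rw [show ((m : Int) + 1) = ((m + 1 : Nat) : Int) by push_cast; ring,
        PySem.List.slice_from_natCast,
        show t.drop (m+1) = (s.drop (lo + m + 1 - 1)).take m from by
          rw [ht, List.drop_take, List.drop_drop]
          congr 1
          · omega
          · congr 1; omega]
      have hmc : PySem.List.pyGetD s (((lo + m : Nat) : Int) - 1) ' ' = s.getD (lo - 1 + m) ' ' := by
        rw [pyGetD_idx s ((lo + m : Nat) : Int) (by omega) (by omega)]
        congr 1
        omega
      by_cases hroot : s.getD (lo - 1 + m) ' ' = '0'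
      · rw [if_pos hroot]
        have hnone : ((PySem.Chars.count t ['1'] == 0) = true) ↔
            (∀ k, k < 2 * m + 1 → s.getD (lo - 1 + k) ' ' ≠ '1') := by
          rw [count_single]
          simp only [beq_iff_eq, List.count_eq_zero]
          rw [ht, mem_seg s (lo - 1) (2 * m + 1) (by omega)]
          push Not
          exact Iff.rfl
        rw [hnone]
        constructor
        · intro hc i hi1 hi2 hP
          exfalso
          rw [pyGetD_idx s i (by omega) (by omega)] at hP
          rw [show (i - 1).toNat = lo - 1 + ((i - 1).toNat - (lo - 1)) from by omega] at hP
          exact hc _ (by omega) hP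
        · intro hR k hk he
          by_cases hkm : k = m
          · subst hkm; rw [hroot] at he; exact absurd he (by decide)
          · have hP : PySem.List.pyGetD s (((lo + k : Nat) : Int) - 1) ' ' = '1' := by
              rw [pyGetD_idx s ((lo + k : Nat) : Int) (by omega) (by omega)]
              rw [show ((((lo + k : Nat) : Int)) - 1).toNat = lo - 1 + k from by omega]
              exact he
            have hd := hR ((lo + k : Nat) : Int) (by omega) (by omega) hP
            rw [descend, hmid, if_neg (by omega), hmc, if_pos hroot] at hd
            exact absurd hd (by decide)
      · rw [if_neg hroot]
        have IHL := IH s lo hlo (by omega)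
        have IHR := IH s (lo + m + 1) (by omega) (by omega)
        rw [hpowh] at IHL IHR
        rw [show ((lo : Int) + ((m + 1 : Nat) : Int) - 2) = ((lo + m : Nat) : Int) - 1 from by
          push_cast; ring] at IHL
        rw [show (((lo + m + 1 : Nat) : Int) + ((m + 1 : Nat) : Int) - 2) = ((lo + 2 * m : Nat) : Int) from by
          push_cast; ring] at IHR
        rw [show ((lo + m + 1 : Nat) : Int) = ((lo + m : Nat) : Int) + 1 from by push_cast; ring] at IHR
        rw [Bool.and_eq_true, IHL, IHR]
        constructor
        · rintro ⟨hL, hR⟩ i hi1 hi2 hP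
          rw [descend, hmid]
          by_cases heq : ((lo + m : Nat) : Int) = i
          · rw [if_pos heq]
          · rw [if_neg heq, hmc, if_neg hroot]
            by_cases hlt : i < ((lo + m : Nat) : Int)
            · rw [if_pos hlt]
              rw [descend_fuel s (m - 1) (lo : Int) (((lo + m : Nat) : Int) - 1) i (2 * m) m
                hi1 (by omega) (by omega) (by omega) (by omega)]
              exact hL i hi1 (by omega) hP
            · rw [if_neg hlt]
              rw [descend_fuel s (m - 1) (((lo + m : Nat) : Int) + 1) ((lo + 2 * m : Nat) : Int) i
                (2 * m) m (by omega) (by omega) (by omega) (by omega) (by omega)]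
              exact hR i (by omega) (by omega) hP
        · intro hRHS
          constructor
          · intro i hi1 hi2 hP
            have hd := hRHS i hi1 (by omega) hP
            rw [descend, hmid, if_neg (by omega), hmc, if_neg hroot, if_pos (by omega)] at hd
            rw [descend_fuel s (m - 1) (lo : Int) (((lo + m : Nat) : Int) - 1) i (2 * m) m
              hi1 (by omega) (by omega) (by omega) (by omega)] at hd
            exact hd
          · intro i hi1 hi2 hP
            have hd := hRHS i (by omega) (by omega) hP
            rw [descend, hmid, if_neg (by omega), hmc, if_neg hroot, if_neg (by omega)] at hd
            rw [descend_fuel s (m - 1) (((lo + m : Nat) : Int) + 1) ((lo + 2 * m : Nat) : Int) i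
              (2 * m) m (by omega) (by omega) (by omega) (by omega) (by omega)] at hd
            exact hd


theorem loops_eq (x : Int) (f : Nat) : ∀ s : Nat, nextFullLenLoop x f s = fullSizeLoop x f s := by
  induction f with
  | zero => intro s; rfl
  | succ f ih =>
    intro s
    rw [nextFullLenLoop, fullSizeLoop]
    split
    · exact ih _
    · rfl

set_option maxHeartbeats 1600000 in
theorem checkOne_eq (n : Int) :
    (if canRep (PySem.Chars.zfill
        (PySem.List.slice (PySem.Int.toBinChars0b n) (some 2) none)
        (nextFullLen (PySem.List.len
          (PySem.List.slice (PySem.Int.toBinChars0b n) (some 2) none)))) then (1 : Int) else 0)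
      = checkOne n := by
  rw [checkOne]
  set s0 : List Char := PySem.List.slice (PySem.Int.toBinChars0b n) (some 2) none with hs0
  set N : Nat := fullSizeLoop (PySem.List.len s0) (PySem.List.len s0).toNat 1 with hN
  obtain ⟨k, hk1, hk2, hk3⟩ := sizeLoop_spec (PySem.List.len s0) (PySem.List.len s0).toNat 1
    le_rfl ⟨1, by norm_num⟩ (by
      rw [PySem.List.len_eq, Int.toNat_natCast]
      have h2 : (s0.length : Int) < 2 ^ s0.length := by
        exact_mod_cast Nat.lt_two_pow_self (n := s0.length)
      have hp : (0 : Int) ≤ 2 ^ s0.length := by positivity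
      push_cast
      linarith)
  rw [← hN] at hk1 hk2 hk3
  rw [PySem.List.len_eq] at hk2
  have hlenN : s0.length ≤ N := by exact_mod_cast hk2
  have hzf : PySem.Chars.zfill s0 (nextFullLen (PySem.List.len s0))
      = List.replicate (N - s0.length) '0' ++ s0 := by
    rw [nextFullLen, loops_eq, ← hN, zfill_no_sign s0 _ (fun c hc => binTail_no_sign n c (hs0 ▸ hc))]
    rw [Int.toNat_natCast]
  rw [hzf]
  set s : List Char := List.replicate (N - s0.length) '0' ++ s0 with hs
  have hslen : s.length = N := by rw [hs]; simp; omega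
  have hiff : (canRep s = true) ↔
      ((PySem.List.pyRange 1 ((N : Int) + 1) 1).all (fun i =>
        if PySem.List.pyGetD s (i - 1) ' ' ≠ '1' then true
        else descend s i 1 (N : Int) (N + 1)) = true) := by
    have hmain := canRep_main k s 1 le_rfl (by omega)
    rw [show (1:Nat) - 1 = 0 from rfl, List.drop_zero] at hmain
    rw [show s.take (2 ^ k - 1) = s from by rw [List.take_of_length_le (by omega)]] at hmain
    have hcast : ((1:Nat):Int) + (2 ^ k : Int) - 2 = (N : Int) := by
      have : (2:Int)^k = ((2^k : Nat) : Int) := by push_cast; ring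
      rw [this]; omega
    rw [show ((1:Nat):Int) = (1:Int) from rfl] at hmain hcast
    rw [hcast] at hmain
    rw [hmain, List.all_eq_true]
    constructor
    · intro hv x hx
      rw [PySem.List.mem_pyRange_one] at hx
      by_cases hP : PySem.List.pyGetD s (x - 1) ' ' = '1'
      · rw [if_neg (by simpa using hP)]
        rw [descend_fuel s (N - 1) 1 (N : Int) x (N + 1) (2 ^ k - 1)
          (by omega) (by omega) (by omega) (by omega) (by omega)]
        exact hv x (by omega) (by omega) hP
      · rw [if_pos (by simpa using hP)]
    · intro hv i hi1 hi2 hP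
      have := hv i (by rw [PySem.List.mem_pyRange_one]; omega)
      rw [if_neg (by simpa using hP)] at this
      rw [descend_fuel s (N - 1) 1 (N : Int) i (N + 1) (2 ^ k - 1)
        (by omega) (by omega) (by omega) (by omega) (by omega)] at this
      exact this
  rcases Bool.dichotomy (canRep s) with hc | hc <;>
    rcases Bool.dichotomy ((PySem.List.pyRange 1 ((N : Int) + 1) 1).all (fun i =>
        if PySem.List.pyGetD s (i - 1) ' ' ≠ '1' then true
        else descend s i 1 (N : Int) (N + 1))) with ha | ha <;>
    simp_all

-- ===== VERDICT (by name: the statement is the Claim_ definition above) =====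
theorem solution_spec : Claim_equal_solution := by
  intro numbers _
  unfold Spec_solution solution solution_alt
  rw [PySem.List.foldl_append_singleton_eq_map, PySem.List.foldl_append_singleton_eq_map]
  exact List.map_congr_left (fun n _ => checkOne_eq n)
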